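-- pv_equiv track=rewrite | github.com/AldoBaldo/Bioinformatics-Algorithms-Class-Work | bioinfo/utils.py | ConsistentSpectrums
-- ===== SOURCE A (Python) =====
-- def ConsistentSpectrums(peptide_spectrum, gene_spectrum):
--     '''Return true if the peptide spectrum is a subset of the gene spectrum'''
--
--     # Make a copies of the spectra so that we don't destroy the originals
--     peptide_spectrum = peptide_spectrum[:]
--     gene_spectrum = gene_spectrum[:]
--
--     for mass in peptide_spectrum:
--         if mass in gene_spectrum:
--             gene_spectrum.remove(mass)
--         else:
--             return False
--
--     return True
-- ===== SOURCE B (Python) =====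
-- def ConsistentSpectrums(peptide_spectrum, gene_spectrum):
--     '''Return true if the peptide spectrum is a subset of the gene spectrum'''
--     sp = sorted(peptide_spectrum)
--     sg = sorted(gene_spectrum)
--     j = 0
--     n = len(sg)
--     for mass in sp:
--         while j < n and sg[j] < mass:
--             j += 1
--         if j == n or sg[j] != mass:
--             return False
--         j += 1
--     return True
-- ===== Notes on version B (the rewrite author's own statement) =====
-- stated objective: alternative
-- what changed: Replaces A's per-mass membership scan and first-occurrence removal over the gene list with sort-then-scan: both spectra are sorted once and a single monotone merge walk matches each peptide mass.
import Mathlib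
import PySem

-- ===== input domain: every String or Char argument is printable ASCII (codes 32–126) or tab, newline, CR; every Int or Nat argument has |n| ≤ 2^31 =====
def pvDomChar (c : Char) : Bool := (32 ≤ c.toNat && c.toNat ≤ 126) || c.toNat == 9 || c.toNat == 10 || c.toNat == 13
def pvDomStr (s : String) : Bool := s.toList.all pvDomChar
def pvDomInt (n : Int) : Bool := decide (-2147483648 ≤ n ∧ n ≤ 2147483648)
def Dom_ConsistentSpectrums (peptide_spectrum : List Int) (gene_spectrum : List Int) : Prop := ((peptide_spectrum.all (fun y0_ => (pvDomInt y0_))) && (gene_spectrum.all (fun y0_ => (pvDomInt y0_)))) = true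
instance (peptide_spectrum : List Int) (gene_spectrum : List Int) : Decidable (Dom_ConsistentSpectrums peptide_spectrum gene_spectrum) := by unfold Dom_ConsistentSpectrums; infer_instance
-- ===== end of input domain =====

-- B replaces A's per-mass membership scan + list removal with sort-then-scan: sort both
-- spectra and match them with one monotone merge walk (objective: alternative algorithm).

-- ===== PORT A =====
-- A's loop: for each mass, if present remove its first occurrence, else return False.
def goA_ConsistentSpectrums (pep gene : List Int) : Bool :=
  match pep with
  | [] => true
  | m :: rest =>
    match PySem.List.remove? gene m with
    | some gene' => goA_ConsistentSpectrums rest gene'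
    | none => false

def ConsistentSpectrums (peptide_spectrum : List Int) (gene_spectrum : List Int) : Bool :=
  goA_ConsistentSpectrums peptide_spectrum gene_spectrum

-- ===== PORT B =====
-- B's merge walk over the two sorted lists: the inner while loop skipping sg[j] < mass
-- is the `h < m` branch; matching sg[j] == mass consumes one element of each list.
def goB_ConsistentSpectrums (sp sg : List Int) : Bool :=
  match sp, sg with
  | [], _ => true
  | _ :: _, [] => false
  | m :: p, h :: g =>
    if h < m then goB_ConsistentSpectrums (m :: p) g
    else if h == m then goB_ConsistentSpectrums p g
    else false
termination_by sp.length + sg.length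

def ConsistentSpectrums_alt (peptide_spectrum : List Int) (gene_spectrum : List Int) : Bool :=
  goB_ConsistentSpectrums (PySem.List.sorted peptide_spectrum (fun x => x) false)
                          (PySem.List.sorted gene_spectrum (fun x => x) false)

-- ===== PRECONDITION & SPEC =====
def Spec_ConsistentSpectrums (peptide_spectrum : List Int) (gene_spectrum : List Int) (out : Bool) : Prop := out = ConsistentSpectrums_alt peptide_spectrum gene_spectrum
instance (peptide_spectrum : List Int) (gene_spectrum : List Int) (out : Bool) : Decidable (Spec_ConsistentSpectrums peptide_spectrum gene_spectrum out) := by unfold Spec_ConsistentSpectrums; infer_instance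

-- ===== CLAIM (what is proved, stated in full; the proofs are below) =====
def Claim_equal_ConsistentSpectrums : Prop := ∀ (peptide_spectrum : List Int) (gene_spectrum : List Int), Dom_ConsistentSpectrums peptide_spectrum gene_spectrum → Spec_ConsistentSpectrums peptide_spectrum gene_spectrum (ConsistentSpectrums peptide_spectrum gene_spectrum)

-- ===== LEMMAS AND PROOFS =====

-- count over a cons, with propositional if (convenient for omega)
theorem pvCountCons (x y : Int) (l : List Int) :
    List.count x (y :: l) = List.count x l + (if y = x then 1 else 0) := by
  simp [List.count_cons]

-- Removing the matched head: p ≤ g.erase m (as counts) iff m :: p ≤ g, given m ∈ g.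
theorem pvEraseStep (m : Int) (p g : List Int) (hm : m ∈ g) :
    (∀ x ∈ p, List.count x p ≤ List.count x (g.erase m)) ↔
    (∀ x ∈ m :: p, List.count x (m :: p) ≤ List.count x g) := by
  have hg : 0 < List.count m g := List.count_pos_iff.mpr hm
  constructor
  · intro hall x hx
    rw [pvCountCons]
    by_cases hxm : m = x
    · subst hxm
      by_cases hmp : m ∈ p
      · have := hall m hmp
        rw [List.count_erase_self] at this
        split_ifs <;> omega
      · rw [List.count_eq_zero.mpr hmp]; split_ifs <;> omega
    · rcases List.mem_cons.mp hx with rfl | hxp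
      · exact absurd rfl hxm
      · have := hall x hxp
        rw [List.count_erase_of_ne (fun he => hxm he.symm)] at this
        simp only [if_neg hxm]; omega
  · intro hall x hxp
    have := hall x (List.mem_cons_of_mem m hxp)
    rw [pvCountCons] at this
    by_cases hxm : m = x
    · subst hxm
      rw [List.count_erase_self]
      split_ifs at this <;> omega
    · rw [List.count_erase_of_ne (fun he => hxm he.symm)]
      simp only [if_neg hxm] at this; omega

-- A head of g smaller than everything in the peptide list contributes nothing.
theorem pvSkipStep (h : Int) (p g : List Int) (hnot : h ∉ p) :
    (∀ x ∈ p, List.count x p ≤ List.count x g) ↔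
    (∀ x ∈ p, List.count x p ≤ List.count x (h :: g)) := by
  have hne : ∀ x ∈ p, List.count x (h :: g) = List.count x g := by
    intro x hx
    rw [pvCountCons, if_neg (fun he => hnot (by rw [he]; exact hx))]
    omega
  constructor <;> intro hall x hx <;> have := hall x hx
  · rw [hne x hx]; omega
  · rw [hne x hx] at this; omega

-- Matching equal heads: p ≤ g iff h :: p ≤ h :: g.
theorem pvMatchStep (h : Int) (p g : List Int) :
    (∀ x ∈ p, List.count x p ≤ List.count x g) ↔
    (∀ x ∈ h :: p, List.count x (h :: p) ≤ List.count x (h :: g)) := by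
  constructor
  · intro hall x hx
    rw [pvCountCons, pvCountCons]
    by_cases hxh : h = x
    · subst hxh
      by_cases hp : h ∈ p
      · have := hall h hp; omega
      · rw [List.count_eq_zero.mpr hp]; omega
    · rcases List.mem_cons.mp hx with rfl | hxp
      · exact absurd rfl hxh
      · have := hall x hxp; omega
  · intro hall x hxp
    have := hall x (List.mem_cons_of_mem h hxp)
    rw [pvCountCons, pvCountCons] at this
    split_ifs at this <;> omega

-- A peptide head missing from g refutes the inclusion.
theorem pvFailStep (m : Int) (p g : List Int) (hm : m ∉ g) :
    ¬ ∀ x ∈ m :: p, List.count x (m :: p) ≤ List.count x g := by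
  intro hall
  have := hall m List.mem_cons_self
  rw [List.count_eq_zero.mpr hm, pvCountCons, if_pos rfl] at this
  omega

-- A's loop decides multiset inclusion (stated via counts).
theorem goA_eq_counts (pep : List Int) : ∀ (gene : List Int),
    goA_ConsistentSpectrums pep gene = decide (∀ x ∈ pep, List.count x pep ≤ List.count x gene) := by
  induction pep with
  | nil => intro gene; simp [goA_ConsistentSpectrums]
  | cons m rest ih =>
    intro gene
    by_cases hm : m ∈ gene
    · rw [show goA_ConsistentSpectrums (m :: rest) gene
            = goA_ConsistentSpectrums rest (gene.erase m) by
          simp [goA_ConsistentSpectrums, PySem.List.remove?_eq_some_erase gene m hm],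
        ih (gene.erase m), decide_eq_decide]
      exact pvEraseStep m rest gene hm
    · rw [show goA_ConsistentSpectrums (m :: rest) gene = false by
          simp [goA_ConsistentSpectrums, (PySem.List.remove?_eq_none_iff gene m).mpr hm]]
      exact (decide_eq_false (pvFailStep m rest gene hm)).symm

-- B's merge walk on (<=-)sorted lists decides the same multiset inclusion.
theorem goB_eq_counts (n : Nat) : ∀ (sp sg : List Int), sp.length + sg.length <= n →
    sp.Pairwise (· ≤ ·) → sg.Pairwise (· ≤ ·) →
    goB_ConsistentSpectrums sp sg = decide (∀ x ∈ sp, List.count x sp ≤ List.count x sg) := by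
  induction n with
  | zero =>
    intro sp sg hlen _ _
    have : sp = [] := by cases sp <;> simp_all
    subst this; simp [goB_ConsistentSpectrums]
  | succ n ih =>
    intro sp sg hlen hsp hsg
    match sp, sg with
    | [], _ => simp [goB_ConsistentSpectrums]
    | m :: p, [] =>
      rw [show goB_ConsistentSpectrums (m :: p) [] = false by
            simp [goB_ConsistentSpectrums]]
      exact (decide_eq_false (pvFailStep m p [] (List.not_mem_nil))).symm
    | m :: p, h :: g =>
      rw [List.pairwise_cons] at hsp hsg
      by_cases hlt : h < m
      · have hnot : h ∉ m :: p := by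
          intro hmem
          rcases List.mem_cons.mp hmem with rfl | hmemp
          · exact absurd hlt (lt_irrefl _)
          · exact absurd (lt_of_lt_of_le hlt (hsp.1 h hmemp)) (lt_irrefl _)
        rw [show goB_ConsistentSpectrums (m :: p) (h :: g)
              = goB_ConsistentSpectrums (m :: p) g by
            simp [goB_ConsistentSpectrums, hlt],
          ih (m :: p) g (by simp at hlen ⊢; omega)
            (List.pairwise_cons.mpr hsp) hsg.2, decide_eq_decide]
        exact pvSkipStep h (m :: p) g hnot
      · by_cases heq : h = m
        · subst heq
          rw [show goB_ConsistentSpectrums (h :: p) (h :: g)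
                = goB_ConsistentSpectrums p g by
              simp [goB_ConsistentSpectrums],
            ih p g (by simp at hlen ⊢; omega) hsp.2 hsg.2, decide_eq_decide]
          exact pvMatchStep h p g
        · have hmlt : m < h := lt_of_le_of_ne (le_of_not_gt hlt) (Ne.symm heq)
          have hmnot : m ∉ h :: g := by
            intro hmem
            rcases List.mem_cons.mp hmem with rfl | hmg
            · exact absurd hmlt (lt_irrefl _)
            · exact absurd (lt_of_lt_of_le hmlt (hsg.1 m hmg)) (lt_irrefl _)
          rw [show goB_ConsistentSpectrums (m :: p) (h :: g) = false by
              simp [goB_ConsistentSpectrums, hlt, heq]]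
          exact (decide_eq_false (pvFailStep m p (h :: g) hmnot)).symm

-- ===== VERDICT (by name: the statement is the Claim_ definition above) =====
theorem ConsistentSpectrums_spec : Claim_equal_ConsistentSpectrums := by
  intro pep gene _
  show ConsistentSpectrums pep gene = ConsistentSpectrums_alt pep gene
  unfold ConsistentSpectrums ConsistentSpectrums_alt
  have hpp : (PySem.List.sorted pep (fun x => x) false).Perm pep :=
    PySem.List.sorted_perm pep (fun x => x) false
  have hgp : (PySem.List.sorted gene (fun x => x) false).Perm gene :=
    PySem.List.sorted_perm gene (fun x => x) false
  rw [goA_eq_counts,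
    goB_eq_counts (pep.length + gene.length) _ _
      (by rw [hpp.length_eq, hgp.length_eq])
      (by simpa using PySem.List.sorted_pairwise pep (fun x => x))
      (by simpa using PySem.List.sorted_pairwise gene (fun x => x)),
    decide_eq_decide]
  constructor <;> intro hall x hx
  · rw [hpp.count_eq, hgp.count_eq]
    exact hall x (hpp.mem_iff.mp hx)
  · rw [← hpp.count_eq, ← hgp.count_eq]
    exact hall x (hpp.mem_iff.mpr hx)
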